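-- pv_equiv track=rewrite | github.com/sochoavi/IJIS_Code | mixed_recon.py | find_ancestors
-- ===== SOURCE A (Python) =====
-- import math
--
-- def find_ancestors(node):
--     # Calculate the parent of a node
--     def calculate_parent(node):
--         return math.ceil(node / 2) - 1
--
--     ancestors = []
--     while node >= 0:
--         ancestors.append(node)
--         parent = calculate_parent(node)
--
--         # Ensure termination by checking if the parent is the same as the current node
--         if parent == node:
--             break
--
--         node = parent
--
--     return ancestors
-- ===== SOURCE B (Python) =====
-- def find_ancestors(node):
--     # Recursion over the parent chain; -(-node // 2) - 1 == math.ceil(node/2) - 1 in exact integer arithmetic.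
--     if node < 0:
--         return []
--     return [node] + find_ancestors(-(-node // 2) - 1)
-- ===== Notes on version B (the rewrite author's own statement) =====
-- stated objective: simpler
-- what changed: Replaces the while-loop with an accumulator list (and its never-firing parent==node break) by a direct recursion over the parent chain that conses the node onto the recursive result, using integer ceiling division -(-node//2)-1 instead of float math.ceil.
import Mathlib
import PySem

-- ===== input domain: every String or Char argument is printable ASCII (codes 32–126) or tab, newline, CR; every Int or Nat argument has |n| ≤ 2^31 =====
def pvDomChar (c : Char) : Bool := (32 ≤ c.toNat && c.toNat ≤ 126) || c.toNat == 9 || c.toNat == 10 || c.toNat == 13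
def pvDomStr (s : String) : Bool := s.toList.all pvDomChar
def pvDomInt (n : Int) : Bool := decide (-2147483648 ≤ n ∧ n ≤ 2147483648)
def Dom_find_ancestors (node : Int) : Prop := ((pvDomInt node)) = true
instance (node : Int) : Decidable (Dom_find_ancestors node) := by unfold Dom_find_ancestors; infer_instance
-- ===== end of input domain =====

-- B replaces A's accumulator while-loop (with its never-firing parent==node break) by a direct
-- recursion over the parent chain; same values, same O(log n) cost (objective: simpler).

-- ===== PORT A =====
-- math.ceil(node / 2) - 1: exact integer ceiling division (exact on the domain, |node| ≤ 2^31 ≪ 2^53)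
def calculate_parent (node : Int) : Int := -(PySem.Int.floordiv (-node) 2) - 1

def find_ancestors_loop (node : Int) (ancestors : List Int) : List Int :=
  if node ≥ 0 then
    let ancestors := ancestors ++ [node]
    let parent := calculate_parent node
    if parent = node then ancestors
    else find_ancestors_loop parent ancestors
  else ancestors
termination_by (node + 1).toNat
decreasing_by
  simp only [calculate_parent]
  rw [PySem.Int.floordiv_eq_ediv_of_pos (by norm_num : (0:Int) < 2)]
  omega

def find_ancestors (node : Int) : List Int := find_ancestors_loop node []

-- ===== PORT B =====
def find_ancestors_alt (node : Int) : List Int :=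
  if node < 0 then []
  else node :: find_ancestors_alt (-(PySem.Int.floordiv (-node) 2) - 1)
termination_by (node + 1).toNat
decreasing_by
  rw [PySem.Int.floordiv_eq_ediv_of_pos (by norm_num : (0:Int) < 2)]
  omega

-- ===== PRECONDITION & SPEC =====
def Spec_find_ancestors (node : Int) (out : List Int) : Prop := out = find_ancestors_alt node
instance (node : Int) (out : List Int) : Decidable (Spec_find_ancestors node out) := by unfold Spec_find_ancestors; infer_instance

-- ===== CLAIM (what is proved, stated in full; the proofs are below) =====
def Claim_equal_find_ancestors : Prop := ∀ (node : Int), Dom_find_ancestors node → Spec_find_ancestors node (find_ancestors node)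

-- ===== LEMMAS AND PROOFS =====
-- for node ≥ 0 the parent is strictly smaller, so A's 'parent = node' break never fires
theorem parent_lt (node : Int) (h : 0 ≤ node) : calculate_parent node < node := by
  simp only [calculate_parent]
  rw [PySem.Int.floordiv_eq_ediv_of_pos (by norm_num : (0:Int) < 2)]
  omega

theorem loop_eq (node : Int) (acc : List Int) :
    find_ancestors_loop node acc = acc ++ find_ancestors_alt node := by
  rw [find_ancestors_loop.eq_def, find_ancestors_alt.eq_def]
  by_cases h : node ≥ 0
  · have hne : calculate_parent node ≠ node := (parent_lt node h).ne
    have hrec := loop_eq (calculate_parent node) (acc ++ [node])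
    simp only [h, if_pos, hne, not_lt.mpr h, if_false, hrec]
    simp [calculate_parent]
  · simp [h, show node < 0 from lt_of_not_ge h]
termination_by (node + 1).toNat
decreasing_by
  have hp := parent_lt node h
  simp only [calculate_parent] at hp ⊢
  rw [PySem.Int.floordiv_eq_ediv_of_pos (by norm_num : (0:Int) < 2)] at hp ⊢
  omega

-- ===== VERDICT (by name: the statement is the Claim_ definition above) =====
theorem find_ancestors_spec : Claim_equal_find_ancestors := by
  intro node _
  unfold Spec_find_ancestors find_ancestors
  simpa using loop_eq node []
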